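-- pv_equiv track=rewrite | github.com/shilorigins/adventofcode | 05.py | part01
-- ===== SOURCE A (Python) =====
-- def part01(rules, updates):
--     predecessors = {i: set() for i in range(1, 101)}
--     for predecessor, successor in rules:
--         predecessors[successor].add(predecessor)
--     correct_mask = [0 for i in range(len(updates))]
--     for i, update in enumerate(updates):
--         try:
--             required_predecessors = set()
--             for num in update:
--                 if num in required_predecessors:
--                     raise ValueError
--                 else:
--                     required_predecessors |= predecessors[num]
--             correct_mask[i] = 1
--         except ValueError:
--             pass
--     return correct_mask
-- ===== SOURCE B (Python) =====
-- def part01(rules, updates):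
--     # Same predecessors table, but each update is validated by an explicit
--     # pairwise scan over its pages instead of A's accumulated-union try/except pass.
--     predecessors = {i: set() for i in range(1, 101)}
--     for predecessor, successor in rules:
--         predecessors[successor].add(predecessor)
--     result = []
--     for update in updates:
--         preds = [predecessors[num] for num in update]
--         result.append(0 if any(update[j] in preds[k]
--                                for j in range(len(update)) for k in range(j)) else 1)
--     return result
-- ===== Notes on version B (the rewrite author's own statement) =====
-- stated objective: alternative
-- what changed: Keeps the predecessors table but replaces A's accumulated-union single pass with try/except control flow by a per-update list of predecessor sets and an explicit pairwise any() scan (fail iff update[j] is a predecessor of an earlier update[k]).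
-- outside the precondition, e.g. on part01([(1, 2)], [[1, 2, 1, 200]]): A returns [0], B raises KeyError
import Mathlib
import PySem

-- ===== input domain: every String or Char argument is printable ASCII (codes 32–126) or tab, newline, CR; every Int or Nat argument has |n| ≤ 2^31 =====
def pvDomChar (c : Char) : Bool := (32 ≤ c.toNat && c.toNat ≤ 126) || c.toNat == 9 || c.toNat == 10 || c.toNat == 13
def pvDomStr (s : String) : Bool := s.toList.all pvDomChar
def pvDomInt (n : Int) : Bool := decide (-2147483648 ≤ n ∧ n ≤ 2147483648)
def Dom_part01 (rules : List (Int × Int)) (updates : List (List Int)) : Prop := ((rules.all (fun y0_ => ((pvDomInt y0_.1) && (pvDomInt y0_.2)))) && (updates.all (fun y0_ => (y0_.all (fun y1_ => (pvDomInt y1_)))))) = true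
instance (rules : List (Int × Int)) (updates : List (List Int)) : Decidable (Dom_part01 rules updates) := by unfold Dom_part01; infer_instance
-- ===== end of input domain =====

-- B replaces A's predecessors-dict + accumulated-union pass (try/except flow) by a direct
-- pairwise rule-set test: an update u is correct iff no pair k < j has (u[j], u[k]) in rules.


-- ===== PORT A =====
-- predecessors = {i: set() for i in range(1, 101)}; predecessors[successor].add(predecessor)
-- (Python raises KeyError for a successor outside 1..100; Dict.modify inserts there instead —
--  those inputs are excluded by Pre_part01.)
def pvBuildPreds (rules : List (Int × Int)) : PySem.Dict Int (PySem.Set Int) :=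
  rules.foldl (fun d r => d.modify r.2 PySem.Set.empty (fun s => PySem.Set.add s r.1))
    ((PySem.List.pyRange 1 101 1).foldl (fun d i => d.insert i PySem.Set.empty) PySem.Dict.empty)

-- one step of the try-block loop: none = ValueError already raised.
-- predecessors[num] is getD … Set.empty: the KeyError case (num outside 1..100) is outside Pre_part01.
def pvStep (preds : PySem.Dict Int (PySem.Set Int)) (acc : Option (PySem.Set Int)) (num : Int) :
    Option (PySem.Set Int) :=
  match acc with
  | none => none
  | some req =>
      if PySem.Set.contains req num then none
      else some (PySem.Set.union req (preds.getD num PySem.Set.empty))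

-- the whole try-block body: some = it ran to completion, none = ValueError was raised
def pvCheckA (preds : PySem.Dict Int (PySem.Set Int)) (update : List Int) :
    Option (PySem.Set Int) :=
  update.foldl (pvStep preds) (some PySem.Set.empty)

def part01 (rules : List (Int × Int)) (updates : List (List Int)) : List Int :=
  let predecessors := pvBuildPreds rules
  let correct_mask : List Int := (PySem.List.pyRange 0 (updates.length : Int) 1).map (fun _ => 0)
  (PySem.List.enumerate updates 0).foldl
    (fun m p =>
      match pvCheckA predecessors p.2 with
      | some _ => m.set p.1.toNat 1   -- correct_mask[i] = 1 (i = enumerate index, always in range)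
      | none => m)                    -- except ValueError: pass
    correct_mask

-- ===== PORT B =====
-- same table build as A's first loop (B's Python repeats those lines verbatim), then a
-- per-update lookup pass 'preds = [predecessors[num] for num in update]' and a pairwise scan.
def part01_alt (rules : List (Int × Int)) (updates : List (List Int)) : List Int :=
  let predecessors := pvBuildPreds rules
  updates.map (fun u =>
    let preds := u.map (fun num => predecessors.getD num PySem.Set.empty)
    if (List.range u.length).any (fun j =>
        (List.range j).any (fun k => PySem.Set.contains (preds.getD k PySem.Set.empty) (u.getD j 0)))
    then 0 else 1)

-- ===== PRECONDITION & SPEC =====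
-- Pre_ keeps every page and rule successor in 1..100, the keys of the predecessors table:
-- outside it A raises KeyError (except when an ordering violation stops A's scan before the
-- out-of-range page — there A returns while B's per-update lookup pass still raises, see cite).
def Pre_part01 (rules : List (Int × Int)) (updates : List (List Int)) : Prop :=
  (∀ r ∈ rules, 1 ≤ r.2 ∧ r.2 ≤ 100) ∧ (∀ u ∈ updates, ∀ n ∈ u, 1 ≤ n ∧ n ≤ 100)
instance (rules : List (Int × Int)) (updates : List (List Int)) : Decidable (Pre_part01 rules updates) := by unfold Pre_part01; infer_instance

def pvWitness_part01 : (List (Int × Int)) × List (List Int) :=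
  ([(47, 53), (97, 13)], [[75, 47, 61, 53, 29], [97, 13, 47], [13, 97]])

def Spec_part01 (rules : List (Int × Int)) (updates : List (List Int)) (out : List Int) : Prop := out = part01_alt rules updates
instance (rules : List (Int × Int)) (updates : List (List Int)) (out : List Int) : Decidable (Spec_part01 rules updates out) := by unfold Spec_part01; infer_instance

-- ===== CLAIM (what is proved, stated in full; the proofs are below) =====
def Claim_equal_part01 : Prop := ∀ (rules : List (Int × Int)) (updates : List (List Int)), Dom_part01 rules updates → Pre_part01 rules updates → Spec_part01 rules updates (part01 rules updates)

-- ===== LEMMAS AND PROOFS =====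

-- the init dict maps every key to the empty set (under getD with default Set.empty)
lemma getD_init_empty (l : List Int) (d : PySem.Dict Int (PySem.Set Int))
    (h : ∀ k, d.getD k PySem.Set.empty = PySem.Set.empty) (k : Int) :
    (l.foldl (fun d i => d.insert i PySem.Set.empty) d).getD k PySem.Set.empty = PySem.Set.empty := by
  induction l generalizing d with
  | nil => exact h k
  | cons x xs ih =>
      simp only [List.foldl_cons]
      exact ih _ (fun k' => by rw [PySem.Dict.getD_insert]; split <;> [rfl; exact h k'])

lemma mem_getD_build (rs : List (Int × Int)) (d : PySem.Dict Int (PySem.Set Int)) (p num : Int) :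
    p ∈ (rs.foldl (fun d r => d.modify r.2 PySem.Set.empty (fun s => PySem.Set.add s r.1)) d).getD num PySem.Set.empty ↔
      p ∈ d.getD num PySem.Set.empty ∨ ∃ r ∈ rs, r.1 = p ∧ r.2 = num := by
  induction rs generalizing d with
  | nil => simp
  | cons r rs ih =>
      simp only [List.foldl_cons]
      rw [ih]
      by_cases hnum : num = r.2
      · subst hnum
        rw [PySem.Dict.getD_modify_self, PySem.Set.mem_add]
        constructor
        · rintro ((h | h) | ⟨r', hr', h1, h2⟩)
          · exact Or.inl h
          · exact Or.inr ⟨r, List.mem_cons_self .., h.symm, rfl⟩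
          · exact Or.inr ⟨r', List.mem_cons_of_mem _ hr', h1, h2⟩
        · rintro (h | ⟨r', hr', h1, h2⟩)
          · exact Or.inl (Or.inl h)
          · rcases List.mem_cons.mp hr' with rfl | hr'
            · exact Or.inl (Or.inr h1.symm)
            · exact Or.inr ⟨r', hr', h1, h2⟩
      · rw [PySem.Dict.getD_modify_of_ne _ _ _ hnum]
        constructor
        · rintro (h | ⟨r', hr', h1, h2⟩)
          · exact Or.inl h
          · exact Or.inr ⟨r', List.mem_cons_of_mem _ hr', h1, h2⟩
        · rintro (h | ⟨r', hr', h1, h2⟩)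
          · exact Or.inl h
          · rcases List.mem_cons.mp hr' with rfl | hr'
            · exact absurd h2.symm hnum
            · exact Or.inr ⟨r', hr', h1, h2⟩

-- predecessors[num] (as a set) holds p exactly when (p, num) is a rule
lemma mem_getD_preds (rules : List (Int × Int)) (p num : Int) :
    p ∈ (pvBuildPreds rules).getD num PySem.Set.empty ↔ (p, num) ∈ rules := by
  unfold pvBuildPreds
  rw [mem_getD_build, getD_init_empty _ _ (fun k => by simp)]
  constructor
  · rintro (h | ⟨r, hr, h1, h2⟩)
    · simp [PySem.Set.empty] at h
    · rcases r with ⟨a, b⟩; cases h1; cases h2; exact hr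
  · intro h; exact Or.inr ⟨(p, num), h, rfl, rfl⟩

lemma foldl_pvStep_none (preds : PySem.Dict Int (PySem.Set Int)) (l : List Int) :
    l.foldl (pvStep preds) none = none := by
  induction l with
  | nil => rfl
  | cons x xs ih => simpa [pvStep] using ih

-- A's inner loop survives iff no page is in the starting set or required by an earlier page
lemma checkA_isSome (rules : List (Int × Int)) (u : List Int) (S : PySem.Set Int) :
    (u.foldl (pvStep (pvBuildPreds rules)) (some S)).isSome = true ↔
      ∀ j, (hj : j < u.length) →
        ¬(u[j] ∈ S ∨ ∃ k, ∃ hk : k < j, (u[j], u[k]'(lt_trans hk hj)) ∈ rules) := by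
  induction u generalizing S with
  | nil => simp
  | cons x xs ih =>
      by_cases hx : x ∈ S
      · have hstep : pvStep (pvBuildPreds rules) (some S) x = none := by
          simp only [pvStep]
          rw [if_pos ((PySem.Set.contains_iff _ _).mpr hx)]
        rw [List.foldl_cons, hstep, foldl_pvStep_none]
        simp only [Option.isSome_none, Bool.false_eq_true, false_iff]
        intro h
        exact (h 0 (by simp)) (Or.inl (by simpa using hx))
      · have hstep : pvStep (pvBuildPreds rules) (some S) x =
            some (PySem.Set.union S ((pvBuildPreds rules).getD x PySem.Set.empty)) := by
          simp only [pvStep]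
          rw [if_neg (fun hc => hx ((PySem.Set.contains_iff _ _).mp hc))]
        rw [List.foldl_cons, hstep, ih]
        constructor
        · intro H j hj
          match j with
          | 0 =>
              rintro (h | ⟨k, hk, _⟩)
              · exact hx (by simpa using h)
              · omega
          | j + 1 =>
              have := H j (by simpa using hj)
              simp only [List.getElem_cons_succ]
              rintro (h | ⟨k, hk, hmem⟩)
              · exact this (Or.inl ((PySem.Set.mem_union _ _ _).mpr (Or.inl h)))
              · match k, hk with
                | 0, _ =>
                    exact this (Or.inl ((PySem.Set.mem_union _ _ _).mpr
                      (Or.inr ((mem_getD_preds ..).mpr (by simpa using hmem)))))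
                | k + 1, hk =>
                    exact this (Or.inr ⟨k, by omega, by simpa using hmem⟩)
        · intro H j hj h
          have H1 := H (j + 1) (by simpa using Nat.succ_lt_succ hj)
          simp only [List.getElem_cons_succ] at H1
          rcases h with h | ⟨k, hk, hm⟩
          · rcases (PySem.Set.mem_union _ _ _).mp h with h' | h'
            · exact H1 (Or.inl h')
            · exact H1 (Or.inr ⟨0, by omega, by simpa using (mem_getD_preds ..).mp h'⟩)
          · exact H1 (Or.inr ⟨k + 1, by omega, by simpa using hm⟩)

-- B's nested any over the looked-up predecessor sets is the pairwise existence statement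
lemma bside_any (rules : List (Int × Int)) (u : List Int) :
    ((List.range u.length).any (fun j =>
        (List.range j).any (fun k =>
          PySem.Set.contains
            ((u.map (fun num => (pvBuildPreds rules).getD num PySem.Set.empty)).getD k PySem.Set.empty)
            (u.getD j 0))) = true) ↔
      ∃ j, ∃ hj : j < u.length, ∃ k, ∃ hk : k < j, (u[j], u[k]'(lt_trans hk hj)) ∈ rules := by
  simp only [List.any_eq_true, List.mem_range, PySem.Set.contains_iff]
  constructor
  · rintro ⟨j, hj, k, hk, h⟩
    rw [List.getD_eq_getElem _ _ hj, List.getD_eq_getElem _ _ (by simpa using lt_trans hk hj),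
      List.getElem_map, mem_getD_preds] at h
    exact ⟨j, hj, k, hk, h⟩
  · rintro ⟨j, hj, k, hk, h⟩
    refine ⟨j, hj, k, hk, ?_⟩
    rw [List.getD_eq_getElem _ _ hj, List.getD_eq_getElem _ _ (by simpa using lt_trans hk hj),
      List.getElem_map, mem_getD_preds]
    exact h

-- per update, A's try-block verdict equals B's pairwise verdict
lemma per_update (rules : List (Int × Int)) (u : List Int) :
    (match pvCheckA (pvBuildPreds rules) u with | some _ => (1 : Int) | none => 0) =
      (if (List.range u.length).any (fun j =>
            (List.range j).any (fun k =>
              PySem.Set.contains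
                ((u.map (fun num => (pvBuildPreds rules).getD num PySem.Set.empty)).getD k PySem.Set.empty)
                (u.getD j 0)))
        then 0 else 1) := by
  have hiff := checkA_isSome rules u PySem.Set.empty
  rcases h : pvCheckA (pvBuildPreds rules) u with _ | req
  · have : ¬ ∀ j, (hj : j < u.length) →
        ¬(u[j] ∈ (PySem.Set.empty : PySem.Set Int) ∨
          ∃ k, ∃ hk : k < j, (u[j], u[k]'(lt_trans hk hj)) ∈ rules) := by
      rw [← hiff]
      unfold pvCheckA at h
      intro hall
      have : (List.foldl (pvStep (pvBuildPreds rules)) (some PySem.Set.empty) u).isSome = true := by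
        exact hall
      rw [h] at this
      exact absurd this (by simp)
    rw [if_pos]
    rw [bside_any]
    push Not at this
    obtain ⟨j, hj, hor⟩ := this
    rcases hor with hmem | ⟨k, hk, hr⟩
    · simp [PySem.Set.empty] at hmem
    · exact ⟨j, hj, k, hk, hr⟩
  · have hall : ∀ j, (hj : j < u.length) →
        ¬(u[j] ∈ (PySem.Set.empty : PySem.Set Int) ∨
          ∃ k, ∃ hk : k < j, (u[j], u[k]'(lt_trans hk hj)) ∈ rules) := by
      rw [← hiff]
      unfold pvCheckA at h
      show (List.foldl (pvStep (pvBuildPreds rules)) (some PySem.Set.empty) u).isSome = true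
      rw [h]
      rfl
    rw [if_neg]
    rw [bside_any]
    rintro ⟨j, hj, k, hk, hr⟩
    exact hall j hj (Or.inr ⟨k, hk, hr⟩)

-- the enumerate/set loop over a zero mask is a map
lemma outer_fold (g : List Int → Option (PySem.Set Int)) (us : List (List Int))
    (acc : List Int) (s : Int) (hs : s = (acc.length : Int)) :
    (PySem.List.enumerate us s).foldl
      (fun m p => match g p.2 with | some _ => m.set p.1.toNat 1 | none => m)
      (acc ++ us.map (fun _ => (0:Int))) =
    acc ++ us.map (fun u => match g u with | some _ => (1:Int) | none => 0) := by
  induction us generalizing acc s with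
  | nil => simp only [PySem.List.enumerate_nil, List.map_nil, List.foldl_nil, List.append_nil]
  | cons u us ih =>
      rw [PySem.List.enumerate_cons]
      simp only [List.foldl_cons, List.map_cons]
      have hset : (acc ++ 0 :: us.map (fun _ => (0:Int))).set s.toNat 1 =
          (acc ++ [(1:Int)]) ++ us.map (fun _ => (0:Int)) := by
        subst hs
        rw [Int.toNat_natCast, List.set_append, if_neg (by omega)]
        simp
      rcases hg : g u with _ | w
      · rw [show acc ++ (0:Int) :: us.map (fun _ => (0:Int)) = (acc ++ [0]) ++ us.map (fun _ => (0:Int)) by simp,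
          ih (acc ++ [0]) (s + 1) (by simp [hs]), List.append_assoc]
        simp
      · rw [hset, ih (acc ++ [1]) (s + 1) (by simp [hs]), List.append_assoc]
        simp

-- the zero mask A allocates is the constant map over the updates
lemma mask_eq (us : List (List Int)) :
    (PySem.List.pyRange 0 (us.length : Int) 1).map (fun _ => (0:Int)) = us.map (fun _ => 0) := by
  rw [PySem.List.pyRange_zero_natCast]
  simp [Function.comp_def]

-- ===== VERDICT (by name: the statement is the Claim_ definition above) =====
theorem part01_spec : Claim_equal_part01 := by
  intro rules updates _ _
  unfold Spec_part01
  dsimp only [part01, part01_alt]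
  rw [mask_eq]
  have h := outer_fold (pvCheckA (pvBuildPreds rules)) updates [] 0 (by simp)
  simp only [List.nil_append] at h
  rw [h]
  exact List.map_congr_left (fun u _ => per_update rules u)
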